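-- pv_equiv track=rewrite | github.com/CharliezXx/UniversityWorks | ปฏิบัติการ/5.3.py | odd_and_sum
-- ===== SOURCE A (Python) =====
-- def odd_and_sum(x):
--     l =[]
--     for i in x:
--         if i % 2 ==0:
--             l.append(i)
--     for j in l:
--         x.remove(j)
--     s=sum(x)
--     return(x,s)
-- ===== SOURCE B (Python) =====
-- def odd_and_sum(x):
--     s = 0
--     for i in range(len(x) - 1, -1, -1):
--         if x[i] % 2 == 0:
--             del x[i]
--         else:
--             s += x[i]
--     return (x, s)
-- ===== Notes on version B (the rewrite author's own statement) =====
-- stated objective: alternative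
-- what changed: Replaced A's two-phase evens-list + remove-by-value loop by a single reverse index pass that deletes evens in place and accumulates the odd sum as it goes.
import Mathlib
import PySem

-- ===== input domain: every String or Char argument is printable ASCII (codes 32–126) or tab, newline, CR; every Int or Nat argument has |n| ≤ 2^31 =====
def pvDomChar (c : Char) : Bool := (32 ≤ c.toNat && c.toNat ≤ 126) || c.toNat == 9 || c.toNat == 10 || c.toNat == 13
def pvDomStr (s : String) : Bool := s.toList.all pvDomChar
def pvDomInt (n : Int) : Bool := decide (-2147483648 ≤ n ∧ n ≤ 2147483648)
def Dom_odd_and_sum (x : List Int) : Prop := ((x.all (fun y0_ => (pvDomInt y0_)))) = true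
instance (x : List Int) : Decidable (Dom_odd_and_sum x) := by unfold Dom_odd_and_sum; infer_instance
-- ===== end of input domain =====

-- B replaces A's evens-list + remove-by-value loop by one reverse in-place deletion pass that
-- also accumulates the odd sum. Both A and B mutate the argument list in Python (A via remove,
-- B via del); the equivalence proved here is about the returned (list, sum) value.

-- ===== PORT A =====
def odd_and_sum (x : List Int) : List Int × Int :=
  -- l = []; for i in x: if i % 2 == 0: l.append(i)
  let l := x.foldl (fun acc i => if PySem.Int.mod i 2 = 0 then acc ++ [i] else acc) []
  -- for j in l: x.remove(j)  — each j collected from x is still present when removed,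
  -- so Python never raises ValueError here; the .getD fallback is unreachable.
  let x' := l.foldl (fun acc j => (PySem.List.remove? acc j).getD acc) x
  -- s = sum(x)
  (x', x'.foldl (fun s i => s + i) 0)

-- ===== PORT B =====
def odd_and_sum_alt (x : List Int) : List Int × Int :=
  -- for i in range(len(x)-1, -1, -1): if x[i] % 2 == 0: del x[i] else: s += x[i]
  -- the reverse index pass visits elements last-to-first: a foldr over the list
  x.foldr (fun a acc => if PySem.Int.mod a 2 = 0 then acc else (a :: acc.1, acc.2 + a)) ([], 0)

-- ===== PRECONDITION & SPEC =====
def Spec_odd_and_sum (x : List Int) (out : List Int × Int) : Prop := out = odd_and_sum_alt x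
instance (x : List Int) (out : List Int × Int) : Decidable (Spec_odd_and_sum x out) := by unfold Spec_odd_and_sum; infer_instance

-- ===== CLAIM (what is proved, stated in full; the proofs are below) =====
def Claim_equal_odd_and_sum : Prop := ∀ (x : List Int), Dom_odd_and_sum x → Spec_odd_and_sum x (odd_and_sum x)

-- ===== LEMMAS AND PROOFS =====

-- the even test as a Bool predicate
def pvEven (i : Int) : Bool := decide (PySem.Int.mod i 2 = 0)

-- A's removal loop
def pvRemoveAll (l x : List Int) : List Int :=
  l.foldl (fun acc j => (PySem.List.remove? acc j).getD acc) x

theorem pvRemoveAll_cons_odd (l : List Int) (hl : ∀ j ∈ l, pvEven j = true) :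
    ∀ x a, pvEven a = false → pvRemoveAll l (a :: x) = a :: pvRemoveAll l x := by
  induction l with
  | nil => intro x a _; rfl
  | cons j l ih =>
    intro x a ha
    have hj : pvEven j = true := hl j (by simp)
    have hne : a ≠ j := by intro h; rw [h, hj] at ha; cases ha
    have hstep : (PySem.List.remove? (a :: x) j).getD (a :: x)
        = a :: (PySem.List.remove? x j).getD x := by
      rw [PySem.List.remove?_cons_of_ne x hne]
      cases PySem.List.remove? x j <;> rfl
    show pvRemoveAll l ((PySem.List.remove? (a :: x) j).getD (a :: x)) = _
    rw [hstep]
    exact ih (fun j hj => hl j (by simp [hj])) _ a ha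

theorem pvRemoveAll_filter (x : List Int) :
    pvRemoveAll (x.filter pvEven) x = x.filter (fun i => !pvEven i) := by
  induction x with
  | nil => rfl
  | cons a t ih =>
    cases ha : pvEven a with
    | true =>
      rw [List.filter_cons_of_pos (by simp [ha])]
      show pvRemoveAll (t.filter pvEven)
          ((PySem.List.remove? (a :: t) a).getD (a :: t)) = _
      rw [PySem.List.remove?_cons_self, Option.getD_some, ih,
        List.filter_cons_of_neg (by simp [ha])]
    | false =>
      rw [List.filter_cons_of_neg (by simp [ha])]
      rw [pvRemoveAll_cons_odd _ (fun j hj => (List.mem_filter.mp hj).2) t a ha, ih,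
        List.filter_cons_of_pos (by simp [ha])]

theorem pvFoldlAdd (l : List Int) : ∀ s : Int, l.foldl (fun s i => s + i) s = s + l.sum := by
  induction l with
  | nil => intro s; simp
  | cons a t ih => intro s; rw [List.foldl_cons, ih, List.sum_cons]; ring

theorem pvAlt_eq (x : List Int) :
    odd_and_sum_alt x = (x.filter (fun i => !pvEven i), (x.filter (fun i => !pvEven i)).sum) := by
  induction x with
  | nil => rfl
  | cons a t ih =>
    have hfold : odd_and_sum_alt (a :: t)
        = (if PySem.Int.mod a 2 = 0 then odd_and_sum_alt t
           else (a :: (odd_and_sum_alt t).1, (odd_and_sum_alt t).2 + a)) := rfl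
    rw [hfold, ih]
    by_cases h : PySem.Int.mod a 2 = 0
    · have hpa : pvEven a = true := decide_eq_true h
      rw [if_pos h, List.filter_cons_of_neg (by simp [hpa])]
    · have hpa : pvEven a = false := decide_eq_false h
      rw [if_neg h, List.filter_cons_of_pos (by simp [hpa])]
      rw [List.sum_cons, Int.add_comm]

theorem pvA_eq (x : List Int) :
    odd_and_sum x = (x.filter (fun i => !pvEven i), (x.filter (fun i => !pvEven i)).sum) := by
  have hl : x.foldl (fun acc i => if PySem.Int.mod i 2 = 0 then acc ++ [i] else acc) []
      = x.filter pvEven :=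
    PySem.List.foldl_append_ite_eq_filter (fun i => PySem.Int.mod i 2 = 0) x []
  show (pvRemoveAll (x.foldl (fun acc i => if PySem.Int.mod i 2 = 0 then acc ++ [i] else acc) []) x,
    (pvRemoveAll (x.foldl (fun acc i => if PySem.Int.mod i 2 = 0 then acc ++ [i] else acc) []) x).foldl
      (fun s i => s + i) 0) = _
  rw [hl, pvRemoveAll_filter, pvFoldlAdd]
  simp

-- ===== VERDICT (by name: the statement is the Claim_ definition above) =====
theorem odd_and_sum_spec : Claim_equal_odd_and_sum := by
  intro x _
  show odd_and_sum x = odd_and_sum_alt x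
  rw [pvA_eq, pvAlt_eq]
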